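-- pv_equiv track=rewrite | github.com/cookabc/demo-projects | demo-cryptography/01_caesar_cipher.py | generate_encryption_key
-- ===== SOURCE A (Python) =====
-- import string
--
-- def generate_encryption_key(shift):
--   uppercase_letters = string.ascii_letters[26:]
--   key = {}
--   i = 0
--   for c in uppercase_letters:
--     key[c] = uppercase_letters[(i + shift) % 26]
--     i += 1
--   return key
-- ===== SOURCE B (Python) =====
-- import string
--
-- def generate_encryption_key(shift):
--     up = string.ascii_letters[26:]
--     s = shift % 26
--     rot = up[s:] + up[:s]
--     return dict(zip(up, rot))
-- ===== Notes on version B (the rewrite author's own statement) =====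
-- stated objective: idiomatic
-- what changed: Replaces the indexed loop with per-element modulo arithmetic by a single whole-alphabet rotation (slice-and-concatenate) zipped positionally against the alphabet.
import Mathlib
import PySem

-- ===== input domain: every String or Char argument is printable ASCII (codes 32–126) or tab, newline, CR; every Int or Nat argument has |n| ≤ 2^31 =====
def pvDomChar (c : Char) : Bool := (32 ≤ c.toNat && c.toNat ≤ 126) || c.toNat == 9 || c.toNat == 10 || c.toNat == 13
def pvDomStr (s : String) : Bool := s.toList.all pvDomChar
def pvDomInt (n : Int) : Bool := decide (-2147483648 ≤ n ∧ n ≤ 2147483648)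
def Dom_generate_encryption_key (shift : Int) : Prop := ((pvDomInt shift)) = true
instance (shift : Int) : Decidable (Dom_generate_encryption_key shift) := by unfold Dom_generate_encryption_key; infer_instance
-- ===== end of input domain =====

-- B builds the Caesar key by one whole-alphabet rotation (slice + concatenate) zipped against the
-- alphabet, instead of A's indexed loop with a per-element modulo; same cost, plainer shape.

-- string.ascii_letters
def pvAsciiLetters : List Char := "abcdefghijklmnopqrstuvwxyzABCDEFGHIJKLMNOPQRSTUVWXYZ".toList

-- ===== PORT A =====
-- the loop body of A: key[c] = uppercase_letters[(i + shift) % 26]; i += 1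
-- (the index is always in [0, 26), so the string indexing never raises)
def genAstep (shift : Int) (uppercase_letters : List Char)
    (st : PySem.Dict String String × Int) (c : Char) : PySem.Dict String String × Int :=
  (st.1.insert (String.singleton c)
    (match PySem.Chars.pyGet? uppercase_letters (PySem.Int.mod (st.2 + shift) 26) with
     | some ch => String.singleton ch
     | none => ""),
   st.2 + 1)

def generate_encryption_key (shift : Int) : List (String × String) :=
  let uppercase_letters := PySem.Chars.slice pvAsciiLetters (some 26) none
  let res := uppercase_letters.foldl (genAstep shift uppercase_letters) (PySem.Dict.empty, 0)
  res.1.items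

-- ===== PORT B =====
def generate_encryption_key_alt (shift : Int) : List (String × String) :=
  let up := PySem.Chars.slice pvAsciiLetters (some 26) none
  let s := PySem.Int.mod shift 26
  let rot := PySem.Chars.slice up (some s) none ++ PySem.Chars.slice up none (some s)
  (PySem.Dict.ofList ((up.zip rot).map (fun p => (String.singleton p.1, String.singleton p.2)))).items

-- ===== PRECONDITION & SPEC =====
def Spec_generate_encryption_key (shift : Int) (out : List (String × String)) : Prop := out = generate_encryption_key_alt shift
instance (shift : Int) (out : List (String × String)) : Decidable (Spec_generate_encryption_key shift out) := by unfold Spec_generate_encryption_key; infer_instance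

-- ===== CLAIM (what is proved, stated in full; the proofs are below) =====
def Claim_equal_generate_encryption_key : Prop := ∀ (shift : Int), Dom_generate_encryption_key shift → Spec_generate_encryption_key shift (generate_encryption_key shift)

-- ===== LEMMAS AND PROOFS =====

-- A's result depends on shift only through shift % 26
theorem genA_congr (s₁ s₂ : Int) (h : s₁ % 26 = s₂ % 26) :
    generate_encryption_key s₁ = generate_encryption_key s₂ := by
  have hm : ∀ i : Int, PySem.Int.mod (i + s₁) 26 = PySem.Int.mod (i + s₂) 26 := by
    intro i
    rw [PySem.Int.mod_eq_emod_of_pos (by norm_num),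
        PySem.Int.mod_eq_emod_of_pos (by norm_num)]
    omega
  have hstep : ∀ up, genAstep s₁ up = genAstep s₂ up := by
    intro up; funext st c; unfold genAstep; rw [hm]
  simp only [generate_encryption_key, hstep]

-- B's result depends on shift only through shift % 26
theorem genB_congr (s₁ s₂ : Int) (h : s₁ % 26 = s₂ % 26) :
    generate_encryption_key_alt s₁ = generate_encryption_key_alt s₂ := by
  have hm : PySem.Int.mod s₁ 26 = PySem.Int.mod s₂ 26 := by
    rw [PySem.Int.mod_eq_emod_of_pos (by norm_num),
        PySem.Int.mod_eq_emod_of_pos (by norm_num)]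
    exact h
  simp only [generate_encryption_key_alt, hm]

-- the 26 representative shifts, checked by computation
theorem gen_eq_small : ∀ n : Nat, n < 26 →
    generate_encryption_key (n : Int) = generate_encryption_key_alt (n : Int) := by decide

-- ===== VERDICT (by name: the statement is the Claim_ definition above) =====
theorem generate_encryption_key_spec : Claim_equal_generate_encryption_key := by
  intro shift _
  unfold Spec_generate_encryption_key
  have h0 : (0 : Int) < 26 := by norm_num
  have hr0 : 0 ≤ shift % 26 := Int.emod_nonneg _ (by norm_num)
  have hr1 : shift % 26 < 26 := Int.emod_lt_of_pos _ h0
  have hmod : ((shift % 26).toNat : Int) % 26 = shift % 26 := by omega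
  calc generate_encryption_key shift
      = generate_encryption_key (((shift % 26).toNat : Int)) := genA_congr _ _ (by omega)
    _ = generate_encryption_key_alt (((shift % 26).toNat : Int)) :=
        gen_eq_small (shift % 26).toNat (by omega)
    _ = generate_encryption_key_alt shift := genB_congr _ _ (by omega)
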